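-- pv_equiv track=rewrite | github.com/MagaluCloud/s3-specs | reports/src/ghActionsScrapper.py | __find_jobs__
-- ===== SOURCE A (Python) =====
-- def __find_jobs__(base_str: str) -> list[str]:
--     lines = base_str.splitlines()
--     arr = []  # Stores grouped sections
--     current_group = []  # Temporary storage for the current section
--
--     for line in lines:
--         if line.isupper() or not line.strip():  # New section (uppercase or empty line)
--             if current_group:  # Avoid adding empty groups
--                 arr.append(current_group)
--             current_group = [line]  # Start a new group
--         else:
--             current_group.append(line)
--
--     if current_group:  # Append the last group
--         arr.append(current_group)
--
--     # Filter out groups that do not start with an uppercase title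
--     filtered_arr = [group for group in arr if group and group[0].isupper()]
--     return filtered_arr
-- ===== SOURCE B (Python) =====
-- def __find_jobs__(base_str: str) -> list[str]:
--     # Single scan: emit a slice per uppercase-headed section directly; no
--     # intermediate discarded groups and no final filter pass.
--     lines = base_str.splitlines()
--     out = []
--     i, n = 0, len(lines)
--     while i < n:
--         if lines[i].isupper():
--             j = i + 1
--             while j < n and not (lines[j].isupper() or not lines[j].strip()):
--                 j += 1
--             out.append(lines[i:j])
--             i = j
--         else:
--             i += 1
--     return out
-- ===== Notes on version B (the rewrite author's own statement) =====
-- stated objective: simpler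
-- what changed: Replaces A's accumulate-every-group-then-filter fold by a single forward scan that, at each uppercase header line, takes the span up to the next boundary (uppercase or blank line) and emits it directly, skipping all other lines; no intermediate discarded groups and no final filter pass.
import Mathlib
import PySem

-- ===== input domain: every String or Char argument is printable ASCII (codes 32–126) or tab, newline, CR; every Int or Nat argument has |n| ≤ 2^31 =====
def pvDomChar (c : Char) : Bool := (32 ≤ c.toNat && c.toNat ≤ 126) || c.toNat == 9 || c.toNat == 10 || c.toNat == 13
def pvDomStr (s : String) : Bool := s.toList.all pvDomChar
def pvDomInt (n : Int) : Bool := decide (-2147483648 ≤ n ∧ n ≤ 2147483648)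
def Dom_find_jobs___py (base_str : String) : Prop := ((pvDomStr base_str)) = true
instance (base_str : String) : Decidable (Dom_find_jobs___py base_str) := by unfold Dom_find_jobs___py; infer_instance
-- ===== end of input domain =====

-- B replaces A's accumulate-all-groups-then-filter fold by a single scan that emits
-- each uppercase-headed span directly (simpler decomposition; same O(n) cost).


-- ===== PORT A =====
-- str.isupper(), ported by hand (no PySem string version): exact on printable ASCII,
-- where the cased characters are exactly the letters: some uppercase and no lowercase char.
def pvIsupperStr (s : String) : Bool :=
  s.toList.any PySem.Chars.isupper && !(s.toList.any PySem.Chars.islower)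

-- `line.isupper() or not line.strip()`
def pvBoundary (l : String) : Bool := pvIsupperStr l || (PySem.Str.strip l == "")

-- `group and group[0].isupper()`
def pvKeep (g : List String) : Bool := match g with | [] => false | h :: _ => pvIsupperStr h

-- the loop body of A: state = (arr, current_group)
def pvStepA (st : List (List String) × List String) (line : String) :
    List (List String) × List String :=
  if pvBoundary line then
    ((if st.2.isEmpty then st.1 else st.1 ++ [st.2]), [line])
  else
    (st.1, st.2 ++ [line])

-- `if current_group: arr.append(current_group)` after the loop
def pvFinA (st : List (List String) × List String) : List (List String) :=
  if st.2.isEmpty then st.1 else st.1 ++ [st.2]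

def find_jobs___py (base_str : String) : List (List String) :=
  let lines := PySem.Str.splitlines base_str
  let st := lines.foldl pvStepA ([], [])
  (pvFinA st).filter pvKeep

-- ===== PORT B =====
-- B's scan: at an uppercase line take the span up to the next boundary and emit it,
-- otherwise skip the line (the index/slice loop of Source B, transcribed structurally).
def pvAltLoop : List String → List (List String)
  | [] => []
  | l :: ls =>
    if pvIsupperStr l then
      (l :: ls.takeWhile (fun x => !pvBoundary x)) ::
        pvAltLoop (ls.dropWhile (fun x => !pvBoundary x))
    else pvAltLoop ls
termination_by ls => ls.length
decreasing_by
  · exact Nat.lt_succ_of_le (List.length_dropWhile_le _ _)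
  · exact Nat.lt_succ_self _

def find_jobs___py_alt (base_str : String) : List (List String) :=
  pvAltLoop (PySem.Str.splitlines base_str)

-- ===== PRECONDITION & SPEC =====
def Spec_find_jobs___py (base_str : String) (out : List (List String)) : Prop := out = find_jobs___py_alt base_str
instance (base_str : String) (out : List (List String)) : Decidable (Spec_find_jobs___py base_str out) := by unfold Spec_find_jobs___py; infer_instance

-- ===== CLAIM (what is proved, stated in full; the proofs are below) =====
def Claim_equal_find_jobs___py : Prop := ∀ (base_str : String), Dom_find_jobs___py base_str → Spec_find_jobs___py base_str (find_jobs___py base_str)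

-- ===== LEMMAS AND PROOFS =====

-- A's fold only appends to arr, so a filtered arr-prefix factors out.
theorem pv_prefix (ls : List String) (arr : List (List String)) (cur : List String) :
    (pvFinA (ls.foldl pvStepA (arr, cur))).filter pvKeep =
      arr.filter pvKeep ++ (pvFinA (ls.foldl pvStepA ([], cur))).filter pvKeep := by
  induction ls generalizing arr cur with
  | nil =>
    simp only [List.foldl_nil, pvFinA]
    cases h : cur.isEmpty
    · simp [List.filter_append]
    · simp
  | cons l t ih =>
    simp only [List.foldl_cons, pvStepA]
    by_cases hb : pvBoundary l = true
    · rw [if_pos hb, if_pos hb]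
      cases h : cur.isEmpty
      · rw [if_neg (by decide), if_neg (by decide)]
        rw [ih (arr ++ [cur]) [l], ih ([] ++ [cur]) [l]]
        simp [List.filter_append]
      · rw [if_pos rfl, if_pos rfl]
        exact ih arr [l]
    · rw [if_neg hb, if_neg hb]
      exact ih arr (cur ++ [l])

-- Main invariant: a fold running with a nonempty current group h::rest equals
-- B's scan, with the pending group completed by the next boundary-free span.
theorem pv_main (ls : List String) (h : String) (rest : List String) :
    (pvFinA (ls.foldl pvStepA ([], h :: rest))).filter pvKeep =
      if pvIsupperStr h then
        ((h :: rest) ++ ls.takeWhile (fun x => !pvBoundary x)) ::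
          pvAltLoop (ls.dropWhile (fun x => !pvBoundary x))
      else pvAltLoop ls := by
  induction ls generalizing h rest with
  | nil =>
    simp only [List.foldl_nil, pvFinA, List.isEmpty_cons]
    cases hu : pvIsupperStr h <;> simp [pvKeep, pvAltLoop, hu]
  | cons l t ih =>
    simp only [List.foldl_cons, pvStepA]
    by_cases hb : pvBoundary l = true
    · rw [if_pos hb]
      simp only [List.isEmpty_cons, Bool.false_eq_true, if_neg, not_false_eq_true,
        List.nil_append]
      rw [pv_prefix t [h :: rest] [l], ih l []]
      have halt : pvAltLoop (l :: t) =
          if pvIsupperStr l then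
            (l :: t.takeWhile (fun x => !pvBoundary x)) ::
              pvAltLoop (t.dropWhile (fun x => !pvBoundary x))
          else pvAltLoop t := by
        rw [pvAltLoop]
      simp only [List.singleton_append]
      rw [← halt]
      simp only [List.takeWhile_cons, List.dropWhile_cons, hb, Bool.not_true,
        Bool.false_eq_true, if_neg, not_false_eq_true]
      cases hu : pvIsupperStr h <;> simp [pvKeep, hu]
    · have hbn : pvBoundary l = false := by simpa using hb
      have hun : pvIsupperStr l = false := by
        cases hl : pvIsupperStr l
        · rfl
        · exfalso; simp [pvBoundary, hl] at hbn
      rw [if_neg hb]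
      have hc : (h :: rest) ++ [l] = h :: (rest ++ [l]) := by simp
      rw [hc, ih h (rest ++ [l])]
      simp only [List.takeWhile_cons, List.dropWhile_cons, hbn, Bool.not_false, if_pos]
      have halt : pvAltLoop (l :: t) = pvAltLoop t := by
        rw [pvAltLoop]; simp [hun]
      rw [halt]
      cases hu : pvIsupperStr h <;> simp

-- ===== VERDICT (by name: the statement is the Claim_ definition above) =====
theorem find_jobs___py_spec : Claim_equal_find_jobs___py := by
  intro base_str _
  show find_jobs___py base_str = find_jobs___py_alt base_str
  unfold find_jobs___py find_jobs___py_alt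
  cases hls : PySem.Str.splitlines base_str with
  | nil => simp [pvFinA, pvAltLoop]
  | cons l t =>
    have hstart : pvStepA ([], []) l = ([], [l]) := by
      unfold pvStepA; cases pvBoundary l <;> simp
    simp only [List.foldl_cons, hstart]
    rw [pv_main t l [], pvAltLoop]
    cases hu : pvIsupperStr l <;> simp
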